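-- pv_equiv track=rewrite | github.com/beskacz/egx-cnc | cncview/cncview.py | parse_cnc
-- ===== SOURCE A (Python) =====
-- def parse_cnc(in_txt):
--     charset  = '.,;ABCDEFGHIJKLMNOPQRSTUVWXYZ0123456789'
--     tokens = None
--     txt = ''
--     for c in in_txt:
--         if c in charset:
--             txt = txt + c
--     return (txt.split(';'))
-- ===== SOURCE B (Python) =====
-- def parse_cnc(in_txt):
--     charset = '.,;ABCDEFGHIJKLMNOPQRSTUVWXYZ0123456789'
--     tokens = []
--     cur = ''
--     for c in in_txt:
--         if c in charset:
--             if c == ';':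
--                 tokens.append(cur)
--                 cur = ''
--             else:
--                 cur = cur + c
--     tokens.append(cur)
--     return tokens
-- ===== Notes on version B (the rewrite author's own statement) =====
-- stated objective: alternative
-- what changed: Fuses A's filter pass and the separate str.split(';') rescan into one single-pass tokenizer that emits tokens directly, with no intermediate filtered string.
import Mathlib
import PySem

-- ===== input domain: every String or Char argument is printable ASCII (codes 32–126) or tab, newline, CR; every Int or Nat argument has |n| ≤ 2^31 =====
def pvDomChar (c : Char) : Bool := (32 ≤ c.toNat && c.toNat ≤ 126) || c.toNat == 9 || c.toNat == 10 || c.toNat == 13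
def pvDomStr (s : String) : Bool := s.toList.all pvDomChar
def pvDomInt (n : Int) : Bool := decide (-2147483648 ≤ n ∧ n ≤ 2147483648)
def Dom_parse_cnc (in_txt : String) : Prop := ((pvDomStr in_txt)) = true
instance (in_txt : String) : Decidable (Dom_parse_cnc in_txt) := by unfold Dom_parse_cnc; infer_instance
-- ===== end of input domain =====

-- B fuses A's filter pass and the separate split(';') rescan into one single-pass tokenizer (alternative decomposition, same cost).

-- ===== PORT A =====
-- filter the allowed characters into txt, then split txt on ';'
def parse_cnc (in_txt : String) : List String :=
  let charset := ".,;ABCDEFGHIJKLMNOPQRSTUVWXYZ0123456789"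
  let txt := in_txt.toList.foldl
    (fun t c => if PySem.Chars.isIn [c] charset.toList then t.push c else t) ""
  -- txt.split(';'): sep is the non-empty literal ";", so split? is always `some`
  (PySem.Str.split? txt ";").getD []

-- ===== PORT B =====
-- single pass: skip disallowed chars; ';' closes the current token, anything else extends it
def parse_cnc_alt (in_txt : String) : List String :=
  let charset := ".,;ABCDEFGHIJKLMNOPQRSTUVWXYZ0123456789"
  let st := in_txt.toList.foldl
    (fun (st : List String × String) c =>
      if PySem.Chars.isIn [c] charset.toList then
        if c == ';' then (st.1 ++ [st.2], "") else (st.1, st.2.push c)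
      else st) ([], "")
  st.1 ++ [st.2]

-- ===== PRECONDITION & SPEC =====
def Spec_parse_cnc (in_txt : String) (out : List String) : Prop := out = parse_cnc_alt in_txt
instance (in_txt : String) (out : List String) : Decidable (Spec_parse_cnc in_txt out) := by unfold Spec_parse_cnc; infer_instance

-- ===== CLAIM (what is proved, stated in full; the proofs are below) =====
def Claim_equal_parse_cnc : Prop := ∀ (in_txt : String), Dom_parse_cnc in_txt → Spec_parse_cnc in_txt (parse_cnc in_txt)

-- ===== LEMMAS AND PROOFS =====

-- the character filter both programs apply
def pvKeep (c : Char) : Bool :=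
  PySem.Chars.isIn [c] ".,;ABCDEFGHIJKLMNOPQRSTUVWXYZ0123456789".toList

-- reference single-character split on ';'
def split1 : List Char → List (List Char)
  | [] => [[]]
  | c :: r =>
    if c = ';' then [] :: split1 r
    else match split1 r with
      | [] => [[c]]
      | t :: ts => (c :: t) :: ts

lemma split1_ne_nil (l : List Char) : split1 l ≠ [] := by
  cases l with
  | nil => simp [split1]
  | cons c r =>
    simp only [split1]
    split_ifs
    · simp
    · cases h : split1 r <;> simp

-- A's filter loop builds exactly the filtered character list
lemma filter_loop (cs : List Char) (s : String) :
    (cs.foldl (fun t c => if pvKeep c then t.push c else t) s).toList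
      = s.toList ++ cs.filter pvKeep := by
  induction cs generalizing s with
  | nil => simp
  | cons c cs ih =>
    by_cases h : pvKeep c = true <;>
      simp [List.foldl_cons, h, ih, String.toList_push]

-- splitOn.go with single-char separator computes split1 (fuel-generic)
lemma go_split1 (fuel : Nat) (l cur : List Char) (acc : List (List Char))
    (h : l.length ≤ fuel) :
    PySem.Chars.splitOn.go [';'] fuel l cur acc
      = acc.reverse ++ (cur.reverse ++ (split1 l).headI) :: (split1 l).tail := by
  induction fuel generalizing l cur acc with
  | zero =>
    have hl : l = [] := List.length_eq_zero_iff.mp (Nat.le_zero.mp h)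
    subst hl
    simp [PySem.Chars.splitOn.go, split1]
  | succ fuel ih =>
    cases l with
    | nil => simp [PySem.Chars.splitOn.go, split1]
    | cons c rest =>
      simp only [PySem.Chars.splitOn.go]
      by_cases hc : c = ';'
      · subst hc
        have hp : List.isPrefixOf [';'] (';' :: rest) = true := by
          simp [List.isPrefixOf]
        rw [if_pos hp]
        rw [show List.drop ([';'].length) (';' :: rest) = rest from rfl]
        rw [ih rest [] (cur.reverse :: acc) (by simpa using Nat.le_of_succ_le_succ h)]
        have hne := split1_ne_nil rest
        cases hs : split1 rest with
        | nil => exact absurd hs hne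
        | cons t ts => simp [split1, hs]
      · have hp' : List.isPrefixOf [';'] (c :: rest) = false := by
          simp [List.isPrefixOf]
          exact fun h' => hc h'.symm
        rw [if_neg (by simp [hp'])]
        have := ih rest (c :: cur) acc (by simpa using Nat.le_of_succ_le_succ h)
        rw [this]
        have hne := split1_ne_nil rest
        cases hs : split1 rest with
        | nil => exact absurd hs hne
        | cons t ts => simp [split1, hc, hs]

lemma splitOn_eq_split1 (l : List Char) :
    PySem.Chars.splitOn l [';'] = split1 l := by
  unfold PySem.Chars.splitOn
  rw [go_split1 (l.length + 1) l [] [] (Nat.le_succ _)]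
  have hne := split1_ne_nil l
  cases hs : split1 l with
  | nil => exact absurd hs hne
  | cons t ts => simp

-- glue a pending prefix onto the first part and render
def pvOut (pre : List Char) : List (List Char) → List String
  | [] => [String.ofList pre]
  | t :: ts => String.ofList (pre ++ t) :: ts.map String.ofList

-- B's fold emits exactly split1 of the filtered characters
lemma tok_loop (cs : List Char) (tokens : List String) (cur : String) :
    (cs.foldl
        (fun (st : List String × String) c =>
          if pvKeep c then
            if c == ';' then (st.1 ++ [st.2], "") else (st.1, st.2.push c)
          else st) (tokens, cur)).1
      ++ [(cs.foldl
        (fun (st : List String × String) c =>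
          if pvKeep c then
            if c == ';' then (st.1 ++ [st.2], "") else (st.1, st.2.push c)
          else st) (tokens, cur)).2]
      = tokens ++ pvOut cur.toList (split1 (cs.filter pvKeep)) := by
  induction cs generalizing tokens cur with
  | nil => simp [pvOut, split1, String.ofList]
  | cons c cs ih =>
    by_cases h : pvKeep c = true
    · by_cases hc : c = ';'
      · subst hc
        simp only [List.foldl_cons, h, if_true, beq_self_eq_true, List.filter_cons_of_pos h]
        rw [ih]
        have hne := split1_ne_nil (cs.filter pvKeep)
        cases hs : split1 (cs.filter pvKeep) with
        | nil => exact absurd hs hne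
        | cons t ts => simp [pvOut, split1, hs, String.ofList]
      · have hbc : (c == ';') = false := by simp [hc]
        simp only [List.foldl_cons, h, if_true, hbc, Bool.false_eq_true, if_false,
          List.filter_cons_of_pos h]
        rw [ih]
        have hne := split1_ne_nil (cs.filter pvKeep)
        cases hs : split1 (cs.filter pvKeep) with
        | nil => exact absurd hs hne
        | cons t ts =>
          simp [pvOut, split1, hc, hs, String.toList_push]
    · simp only [List.foldl_cons, if_neg h, List.filter_cons_of_neg (by simpa using h)]
      exact ih tokens cur

-- ===== VERDICT (by name: the statement is the Claim_ definition above) =====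
theorem parse_cnc_spec : Claim_equal_parse_cnc := by
  intro in_txt _
  unfold Spec_parse_cnc parse_cnc parse_cnc_alt
  have hk : ∀ c : Char,
      PySem.Chars.isIn [c] (".,;ABCDEFGHIJKLMNOPQRSTUVWXYZ0123456789").toList = pvKeep c :=
    fun _ => rfl
  simp only [hk, PySem.Str.split?, PySem.Chars.split?]
  rw [tok_loop in_txt.toList [] "", filter_loop in_txt.toList ""]
  rw [if_neg (by simp)]
  rw [show (";".toList) = [';'] from rfl]
  rw [splitOn_eq_split1]
  have hne := split1_ne_nil (in_txt.toList.filter pvKeep)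
  cases hs : split1 (in_txt.toList.filter pvKeep) with
  | nil => exact absurd hs hne
  | cons t ts => simp [pvOut, hs]
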